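-- pv_equiv track=rewrite | github.com/Denker233/dlrm_minrui | dlrm_hot.py | _calculate_split_sizes
-- ===== SOURCE A (Python) =====
-- def _calculate_split_sizes(total_size, num_splits):
--     """
--     Calculate sizes for splitting a table into num_splits sub-tables.
--     Distributes rows as evenly as possible.
--
--     Args:
--         total_size: Total number of rows in the table
--         num_splits: Number of sub-tables to create
--
--     Returns:
--         list: List of sub-table sizes (integers)
--     """
--     base_size = total_size // num_splits
--     remainder = total_size % num_splits
--
--     # Distribute remainder across first 'remainder' sub-tables
--     split_sizes = []
--     for i in range(num_splits):
--         if i < remainder: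
--             split_sizes.append(base_size + 1)
--         else:
--             split_sizes.append(base_size)
--
--     return split_sizes
-- ===== SOURCE B (Python) =====
-- def _calculate_split_sizes(total_size, num_splits):
--     # Greedy peeling: repeatedly take the ceiling of remaining/parts_left.
--     split_sizes = []
--     remaining = total_size
--     for parts_left in range(num_splits, 0, -1):
--         size = -(-remaining // parts_left)  # ceil division
--         split_sizes.append(size)
--         remaining -= size
--     return split_sizes
-- ===== Notes on version B (the rewrite author's own statement) =====
-- stated objective: alternative
-- what changed: Instead of precomputing base=total//n and remainder and branching per index, B peels parts greedily: each step takes ceil(remaining/parts_left) and subtracts it from a running remainder, with no division-precomputation or per-index comparison.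
import Mathlib
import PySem

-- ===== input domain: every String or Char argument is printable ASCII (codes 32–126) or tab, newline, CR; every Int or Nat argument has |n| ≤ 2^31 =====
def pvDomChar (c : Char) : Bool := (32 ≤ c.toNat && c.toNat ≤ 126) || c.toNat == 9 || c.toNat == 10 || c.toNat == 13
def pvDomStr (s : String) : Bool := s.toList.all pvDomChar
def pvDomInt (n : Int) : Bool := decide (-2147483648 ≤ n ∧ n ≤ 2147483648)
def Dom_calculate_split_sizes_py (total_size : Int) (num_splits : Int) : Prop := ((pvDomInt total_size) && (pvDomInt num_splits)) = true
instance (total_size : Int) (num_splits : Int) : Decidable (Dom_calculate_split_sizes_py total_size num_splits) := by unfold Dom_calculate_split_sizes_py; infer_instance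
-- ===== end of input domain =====

-- B replaces A's precomputed base/remainder with greedy peeling (each part is
-- ceil(remaining/parts_left)); same cost, different algorithm.

-- ===== PORT A =====
-- Port of A: base/remainder via floor division, then a loop over range(num_splits)
-- appending base+1 for the first `remainder` indices and base otherwise.
def calculate_split_sizes_py (total_size : Int) (num_splits : Int) : List Int :=
  let base_size := PySem.Int.floordiv total_size num_splits
  let remainder := PySem.Int.mod total_size num_splits
  (PySem.List.pyRange 0 num_splits 1).foldl
    (fun acc i => if i < remainder then acc ++ [base_size + 1] else acc ++ [base_size]) []

-- ===== PORT B =====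
-- Port of B: loop over range(num_splits, 0, -1) peeling size = ceil(remaining/parts_left),
-- state = (split_sizes, remaining); ceil via -(-remaining // parts_left).
def calculate_split_sizes_py_alt (total_size : Int) (num_splits : Int) : List Int :=
  (((PySem.List.pyRange num_splits 0 (-1)).foldl
    (fun (st : List Int × Int) parts_left =>
      let size := -(PySem.Int.floordiv (-st.2) parts_left)
      (st.1 ++ [size], st.2 - size)) ([], total_size))).1

-- ===== PRECONDITION & SPEC =====
-- A raises ZeroDivisionError exactly when num_splits == 0.
def Pre_calculate_split_sizes_py (total_size : Int) (num_splits : Int) : Prop := num_splits ≠ 0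
instance (total_size : Int) (num_splits : Int) : Decidable (Pre_calculate_split_sizes_py total_size num_splits) := by unfold Pre_calculate_split_sizes_py; infer_instance
def pvWitness_calculate_split_sizes_py : Int × Int := (10, 3)
def Spec_calculate_split_sizes_py (total_size : Int) (num_splits : Int) (out : List Int) : Prop := out = calculate_split_sizes_py_alt total_size num_splits
instance (total_size : Int) (num_splits : Int) (out : List Int) : Decidable (Spec_calculate_split_sizes_py total_size num_splits out) := by unfold Spec_calculate_split_sizes_py; infer_instance

-- ===== CLAIM (what is proved, stated in full; the proofs are below) =====
def Claim_equal_calculate_split_sizes_py : Prop := ∀ (total_size : Int) (num_splits : Int), Dom_calculate_split_sizes_py total_size num_splits → Pre_calculate_split_sizes_py total_size num_splits → Spec_calculate_split_sizes_py total_size num_splits (calculate_split_sizes_py total_size num_splits)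

-- ===== LEMMAS AND PROOFS =====

-- A's loop body 'if c then acc ++ [x] else acc ++ [y]' is appending 'if c then x else y'.
theorem foldl_append_ite_pair {α : Type} (p : Int → Prop) [DecidablePred p] (x y : α)
    (l : List Int) (acc : List α) :
    l.foldl (fun acc i => if p i then acc ++ [x] else acc ++ [y]) acc
      = acc ++ l.map (fun i => if p i then x else y) := by
  have h : (fun (acc : List α) (i : Int) => if p i then acc ++ [x] else acc ++ [y])
      = fun acc i => acc ++ [if p i then x else y] := by
    funext acc i; split <;> rfl
  rw [h, PySem.List.foldl_append_singleton_eq_map]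

-- A's map over range(n) is replicate r (b+1) ++ replicate (n-r) b.
theorem map_ite_range_eq_replicate (r n b : Int) (h0 : 0 ≤ r) (hrn : r ≤ n) :
    (PySem.List.pyRange 0 n 1).map (fun i => if i < r then b + 1 else b)
      = List.replicate r.toNat (b + 1) ++ List.replicate (n - r).toNat b := by
  rw [PySem.List.pyRange_one_append 0 r n h0 hrn, List.map_append]
  have h1 : (PySem.List.pyRange 0 r 1).map (fun i => if i < r then b + 1 else b)
      = List.replicate r.toNat (b + 1) := by
    rw [List.map_congr_left (l := PySem.List.pyRange 0 r 1)
        (g := fun _ => b + 1) (fun i hi => by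
          rw [PySem.List.mem_pyRange_one] at hi
          simp [hi.2])]
    rw [List.map_const', PySem.List.length_pyRange_one]
    norm_num
  have h2 : (PySem.List.pyRange r n 1).map (fun i => if i < r then b + 1 else b)
      = List.replicate (n - r).toNat b := by
    rw [List.map_congr_left (l := PySem.List.pyRange r n 1)
        (g := fun _ => b) (fun i hi => by
          rw [PySem.List.mem_pyRange_one] at hi
          simp [not_lt.mpr hi.1])]
    rw [List.map_const', PySem.List.length_pyRange_one]
  rw [h1, h2]

-- Ceiling step: for 0 < k and b*k + s with 0 ≤ s ≤ k, ceil((b*k+s)/k) is b+1 when s > 0, else b.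
theorem ceil_step (b s k : Int) (hk : 0 < k) (h0 : 0 ≤ s) (hsk : s ≤ k) :
    -(PySem.Int.floordiv (-(b * k + s)) k) = if 0 < s then b + 1 else b := by
  split
  · rw [PySem.Int.neg_floordiv_neg_eq_iff_of_pos hk]
    constructor <;> nlinarith
  · rw [PySem.Int.neg_floordiv_neg_eq_iff_of_pos hk]
    constructor <;> nlinarith

-- B's peeling loop invariant: with j parts left and remaining = b*j + s (0 ≤ s ≤ j),
-- the loop emits s copies of b+1 followed by j - s copies of b.
theorem peel_loop (j : Nat) : ∀ (b s : Int) (acc : List Int), 0 ≤ s → s ≤ (j : Int) →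
    ((PySem.List.pyRange (j : Int) 0 (-1)).foldl
      (fun (st : List Int × Int) parts_left =>
        let size := -(PySem.Int.floordiv (-st.2) parts_left)
        (st.1 ++ [size], st.2 - size)) (acc, b * j + s)).1
      = acc ++ List.replicate s.toNat (b + 1) ++ List.replicate (j - s.toNat) b := by
  induction j with
  | zero =>
    intro b s acc h0 h1
    have hs : s = 0 := le_antisymm (by exact_mod_cast h1) h0
    rw [PySem.List.pyRange_neg_one_eq_nil (by norm_num)]
    simp [hs]
  | succ j ih =>
    intro b s acc h0 h1
    have hjpos : (0 : Int) < ((j : Nat) + 1 : Nat) := by positivity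
    rw [PySem.List.pyRange_neg_one_cons (by exact_mod_cast hjpos), List.foldl_cons]
    simp only
    rw [ceil_step b s ((j : Nat) + 1 : Nat) hjpos h0 (by exact_mod_cast h1)]
    by_cases hs : 0 < s
    · rw [if_pos hs]
      have harg : b * ((j : Nat) + 1 : Nat) + s - (b + 1) = b * (j : Nat) + (s - 1) := by
        push_cast; ring
      have hrange : ((j : Nat) + 1 : Nat) - (1 : Int) = (j : Nat) := by push_cast; ring
      rw [harg, hrange, ih b (s - 1) (acc ++ [b + 1]) (by omega) (by
        have : s ≤ ((j : Nat) : Int) + 1 := by exact_mod_cast h1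
        omega)]
      have hsn : s.toNat = (s - 1).toNat + 1 := by omega
      have hrep : List.replicate s.toNat (b + 1) = (b + 1) :: List.replicate (s - 1).toNat (b + 1) := by
        rw [hsn, List.replicate_succ]
      have hcount : j + 1 - s.toNat = j - (s - 1).toNat := by omega
      rw [hrep, hcount]
      simp
    · rw [if_neg hs]
      have hs0 : s = 0 := le_antisymm (by omega) h0
      have harg : b * ((j : Nat) + 1 : Nat) + s - b = b * (j : Nat) + 0 := by
        rw [hs0]; push_cast; ring
      have hrange : ((j : Nat) + 1 : Nat) - (1 : Int) = (j : Nat) := by push_cast; ring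
      rw [harg, hrange, ih b 0 (acc ++ [b]) le_rfl (by positivity), hs0]
      simp [List.replicate_succ]

-- ===== VERDICT (by name: the statement is the Claim_ definition above) =====
theorem calculate_split_sizes_py_spec : Claim_equal_calculate_split_sizes_py := by
  intro t n _ hn
  unfold Spec_calculate_split_sizes_py calculate_split_sizes_py calculate_split_sizes_py_alt
  simp only
  set b := PySem.Int.floordiv t n with hb
  set r := PySem.Int.mod t n with hr
  rw [foldl_append_ite_pair (p := fun i => i < r) (b + 1) b, List.nil_append]
  rcases lt_or_gt_of_ne hn with hneg | hpos
  · -- num_splits < 0: both loops are empty (A over range(n), B over range(n,0,-1))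
    have hbnd := PySem.Int.mod_neg_bounds (a := t) hneg
    rw [PySem.List.pyRange_one_eq_nil (by omega),
        PySem.List.pyRange_neg_one_eq_nil (by omega)]
    simp
  · -- num_splits > 0: 0 ≤ r < n, t = b*n + r, apply the peel invariant
    have h0 := PySem.Int.mod_nonneg (a := t) hpos
    have h1 := PySem.Int.mod_lt (a := t) hpos
    have ht : t = b * n + r := by
      rw [hb, hr]; exact (PySem.Int.floordiv_mul_add_mod t n).symm
    have hn' : n = ((n.toNat : Nat) : Int) := by omega
    rw [map_ite_range_eq_replicate r n b h0 (le_of_lt h1), ht, hn',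
        peel_loop n.toNat b r [] h0 (by omega)]
    simp only [List.nil_append, List.append_cancel_left_eq]
    have h2 : ((n.toNat : Int) - r).toNat = n.toNat - r.toNat := by omega
    rw [h2]
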